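-- pv_equiv track=rewrite | github.com/mbrt/pkna-uno | make-scenes-dataset.py | get_unique_characters
-- ===== SOURCE A (Python) =====
-- from typing import Any
--
-- def get_unique_characters(panels: list[dict[str, Any]]) -> list[str]:
--     """Extract unique character names from scene panels."""
--     characters = set()
--     for panel in panels:
--         dialogues = panel.get("dialogues", [])
--         for dialogue in dialogues:
--             character = dialogue.get("character", "").strip()
--             if character:
--                 characters.add(character)
--     return sorted(list(characters))
-- ===== SOURCE B (Python) =====
-- def get_unique_characters(panels):
--     """Extract unique character names from scene panels."""
--     names = sorted(c for panel in panels
--                    for dlg in panel.get("dialogues", [])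
--                    if (c := dlg.get("character", "").strip()))
--     out, prev = [], None
--     for name in names:
--         if prev != name:
--             out.append(name)
--             prev = name
--     return out
-- ===== Notes on version B (the rewrite author's own statement) =====
-- stated objective: alternative
-- what changed: B replaces the hash set with a plain collected list that is sorted once and deduplicated by a single adjacency pass tracking the previous element; no set is ever built.
import Mathlib
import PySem

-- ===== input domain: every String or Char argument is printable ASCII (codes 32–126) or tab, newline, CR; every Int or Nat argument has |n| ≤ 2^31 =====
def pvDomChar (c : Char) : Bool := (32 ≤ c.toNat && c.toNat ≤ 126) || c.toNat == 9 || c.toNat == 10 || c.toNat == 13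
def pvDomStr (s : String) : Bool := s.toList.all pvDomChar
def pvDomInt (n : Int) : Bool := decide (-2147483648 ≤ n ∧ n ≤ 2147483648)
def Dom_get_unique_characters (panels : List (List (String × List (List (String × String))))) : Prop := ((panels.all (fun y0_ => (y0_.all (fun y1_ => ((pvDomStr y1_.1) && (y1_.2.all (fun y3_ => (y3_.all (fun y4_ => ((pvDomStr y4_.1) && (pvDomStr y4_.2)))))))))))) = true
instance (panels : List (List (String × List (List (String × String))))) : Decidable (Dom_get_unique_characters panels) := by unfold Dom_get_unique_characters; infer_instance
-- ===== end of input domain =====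

-- B replaces A's hash set with sort-then-adjacency-dedup over the plain collected name list (alternative data representation, same cost).

-- ===== PORT A =====
def get_unique_characters (panels : List (List (String × List (List (String × String))))) : List String :=
  let characters : PySem.Set String :=
    panels.foldl (fun characters panel =>
      let dialogues := PySem.Dict.getD ⟨panel⟩ "dialogues" ([] : List (List (String × String)))
      dialogues.foldl (fun characters dialogue =>
        let character := PySem.Str.strip (PySem.Dict.getD ⟨dialogue⟩ "character" "")
        if character ≠ "" then PySem.Set.add characters character else characters)
        characters)
      PySem.Set.empty
  PySem.List.sorted characters (fun x => x) false

-- ===== PORT B =====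
def get_unique_characters_alt (panels : List (List (String × List (List (String × String))))) : List String :=
  let names := PySem.List.sorted
    (panels.flatMap (fun panel =>
      (PySem.Dict.getD ⟨panel⟩ "dialogues" ([] : List (List (String × String)))).filterMap (fun dlg =>
        let c := PySem.Str.strip (PySem.Dict.getD ⟨dlg⟩ "character" "")
        if c ≠ "" then some c else none)))
    (fun x => x) false
  (names.foldl (fun acc name =>
      if acc.2 ≠ some name then (acc.1 ++ [name], some name) else acc)
      (([] : List String), (none : Option String))).1

-- ===== PRECONDITION & SPEC =====
def Spec_get_unique_characters (panels : List (List (String × List (List (String × String))))) (out : List String) : Prop := out = get_unique_characters_alt panels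
instance (panels : List (List (String × List (List (String × String))))) (out : List String) : Decidable (Spec_get_unique_characters panels out) := by unfold Spec_get_unique_characters; infer_instance

-- ===== CLAIM (what is proved, stated in full; the proofs are below) =====
def Claim_equal_get_unique_characters : Prop := ∀ (panels : List (List (String × List (List (String × String))))), Dom_get_unique_characters panels → Spec_get_unique_characters panels (get_unique_characters panels)

-- ===== LEMMAS AND PROOFS =====

-- the flat list of names B collects
def pvNames (panels : List (List (String × List (List (String × String))))) : List String :=
  panels.flatMap (fun panel =>
    (PySem.Dict.getD ⟨panel⟩ "dialogues" ([] : List (List (String × String)))).filterMap (fun dlg =>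
      let c := PySem.Str.strip (PySem.Dict.getD ⟨dlg⟩ "character" "")
      if c ≠ "" then some c else none))

-- recursion equivalent of B's dedup loop
def pvDedup (prev : Option String) : List String → List String
  | [] => []
  | n :: t => if prev ≠ some n then n :: pvDedup (some n) t else pvDedup prev t

lemma pvDedup_cons_eq (p n : String) (t : List String) (h : ¬ p = n) :
    pvDedup (some p) (n :: t) = n :: pvDedup (some n) t := by
  simp only [pvDedup]
  rw [if_pos (show some p ≠ some n from fun hc => h (Option.some.inj hc))]

lemma pvDedup_cons_skip (p : String) (t : List String) :
    pvDedup (some p) (p :: t) = pvDedup (some p) t := by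
  simp [pvDedup]

lemma pvFoldl_dedup (l : List String) (out : List String) (prev : Option String) :
    (l.foldl (fun acc name =>
      if acc.2 ≠ some name then (acc.1 ++ [name], some name) else acc) (out, prev)).1
    = out ++ pvDedup prev l := by
  induction l generalizing out prev with
  | nil => simp [pvDedup]
  | cons n t ih =>
    rw [List.foldl_cons]
    by_cases h : prev = some n
    · rw [if_neg (by simp [h]), ih]
      subst h
      rw [pvDedup_cons_skip]
    · rw [if_pos (by simp [h]), ih]
      simp only [pvDedup]
      rw [if_pos h, List.append_assoc]
      rfl

lemma pvInner (ds : List (List (String × String))) (s : PySem.Set String) :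
    ds.foldl (fun characters dialogue =>
        let character := PySem.Str.strip (PySem.Dict.getD ⟨dialogue⟩ "character" "")
        if character ≠ "" then PySem.Set.add characters character else characters) s
    = (ds.filterMap (fun dlg =>
        let c := PySem.Str.strip (PySem.Dict.getD ⟨dlg⟩ "character" "")
        if c ≠ "" then some c else none)).foldl PySem.Set.add s := by
  induction ds generalizing s with
  | nil => rfl
  | cons d t ih =>
    rw [List.foldl_cons, List.filterMap_cons]
    by_cases h : PySem.Str.strip (PySem.Dict.getD ⟨d⟩ "character" "") = ""
    · simp only [h]
      rw [if_neg (by simp), ih]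
      simp
    · rw [if_pos h, ih, if_pos h, List.foldl_cons]

lemma pvOuter (panels : List (List (String × List (List (String × String))))) (s : PySem.Set String) :
    panels.foldl (fun characters panel =>
      (PySem.Dict.getD ⟨panel⟩ "dialogues" ([] : List (List (String × String)))).foldl
        (fun characters dialogue =>
          let character := PySem.Str.strip (PySem.Dict.getD ⟨dialogue⟩ "character" "")
          if character ≠ "" then PySem.Set.add characters character else characters)
        characters) s
    = (pvNames panels).foldl PySem.Set.add s := by
  induction panels generalizing s with
  | nil => rfl
  | cons p t ih =>
    rw [List.foldl_cons]
    simp only [pvNames, List.flatMap_cons, List.foldl_append]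
    rw [pvInner, ih]
    rfl

-- dedup of a ≤-sorted list, above a strict lower bound, is strictly increasing and above the bound
lemma pvDedup_lt (l : List String) (hl : l.Pairwise (· ≤ ·)) (p : String) (hp : ∀ x ∈ l, p ≤ x) :
    (pvDedup (some p) l).Pairwise (· < ·) ∧ ∀ x ∈ pvDedup (some p) l, p < x := by
  induction l generalizing p with
  | nil => simp [pvDedup]
  | cons n t ih =>
    have hl' := (List.pairwise_cons.mp hl).2
    have hn := (List.pairwise_cons.mp hl).1
    by_cases h : p = n
    · subst h
      rw [pvDedup_cons_skip]
      exact ih hl' p hn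
    · have hpn : p < n := lt_of_le_of_ne (hp n (by simp)) h
      rw [pvDedup_cons_eq p n t h]
      obtain ⟨h1, h2⟩ := ih hl' n hn
      refine ⟨List.pairwise_cons.mpr ⟨h2, h1⟩, ?_⟩
      intro x hx
      rcases List.mem_cons.mp hx with rfl | hx
      · exact hpn
      · exact hpn.trans (h2 x hx)

lemma pvDedup_mem (l : List String) (hl : l.Pairwise (· ≤ ·)) (p : String) (hp : ∀ x ∈ l, p ≤ x) :
    ∀ x, x ∈ pvDedup (some p) l ↔ (x ∈ l ∧ x ≠ p) := by
  induction l generalizing p with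
  | nil => simp [pvDedup]
  | cons n t ih =>
    have hl' := (List.pairwise_cons.mp hl).2
    have hn := (List.pairwise_cons.mp hl).1
    intro x
    by_cases h : p = n
    · subst h
      rw [pvDedup_cons_skip, ih hl' p hn]
      constructor
      · rintro ⟨hx, hne⟩; exact ⟨List.mem_cons_of_mem _ hx, hne⟩
      · rintro ⟨hx, hne⟩
        rcases List.mem_cons.mp hx with rfl | hx
        · exact absurd rfl hne
        · exact ⟨hx, hne⟩
    · have hpn : p < n := lt_of_le_of_ne (hp n (by simp)) h
      rw [pvDedup_cons_eq p n t h]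
      simp only [List.mem_cons, ih hl' n hn]
      constructor
      · rintro (rfl | ⟨hx, hne⟩)
        · exact ⟨Or.inl rfl, fun hc => h hc.symm⟩
        · refine ⟨Or.inr hx, ?_⟩
          intro hc; subst hc
          exact absurd (hpn.trans_le (hn x hx)) (lt_irrefl _)
      · rintro ⟨(rfl | hx), hne⟩
        · exact Or.inl rfl
        · by_cases hxn : x = n
          · exact Or.inl hxn
          · exact Or.inr ⟨hx, hxn⟩

lemma pvDedup_none_mem (l : List String) (hl : l.Pairwise (· ≤ ·)) :
    ∀ x, x ∈ pvDedup none l ↔ x ∈ l := by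
  cases l with
  | nil => simp [pvDedup]
  | cons n t =>
    have hl' := (List.pairwise_cons.mp hl).2
    have hn := (List.pairwise_cons.mp hl).1
    intro x
    have e : pvDedup none (n :: t) = n :: pvDedup (some n) t := by simp [pvDedup]
    rw [e]
    simp only [List.mem_cons, pvDedup_mem t hl' n hn]
    constructor
    · rintro (rfl | ⟨hx, _⟩)
      · exact Or.inl rfl
      · exact Or.inr hx
    · rintro (rfl | hx)
      · exact Or.inl rfl
      · by_cases hxn : x = n
        · exact Or.inl hxn
        · exact Or.inr ⟨hx, hxn⟩

lemma pvDedup_none_lt (l : List String) (hl : l.Pairwise (· ≤ ·)) :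
    (pvDedup none l).Pairwise (· < ·) := by
  cases l with
  | nil => simp [pvDedup]
  | cons n t =>
    have hl' := (List.pairwise_cons.mp hl).2
    have hn := (List.pairwise_cons.mp hl).1
    have e : pvDedup none (n :: t) = n :: pvDedup (some n) t := by simp [pvDedup]
    rw [e]
    obtain ⟨h1, h2⟩ := pvDedup_lt t hl' n hn
    exact List.pairwise_cons.mpr ⟨h2, h1⟩

-- ===== VERDICT (by name: the statement is the Claim_ definition above) =====
theorem get_unique_characters_spec : Claim_equal_get_unique_characters := by
  intro panels _
  unfold Spec_get_unique_characters get_unique_characters get_unique_characters_alt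
  rw [pvFoldl_dedup]
  simp only [List.nil_append]
  rw [pvOuter]
  show PySem.List.sorted ((pvNames panels).foldl PySem.Set.add PySem.Set.empty) (fun x => x) false
      = pvDedup none (PySem.List.sorted (pvNames panels) (fun x => x) false)
  set L := pvNames panels with hL
  have hset : (L.foldl PySem.Set.add PySem.Set.empty) = PySem.Set.ofList L :=
    (PySem.Set.ofList_eq_foldl L).symm
  rw [hset]
  have hsortedL : (PySem.List.sorted L (fun x => x) false).Pairwise (· ≤ ·) :=
    PySem.List.sorted_pairwise L (fun x => x)
  set S := PySem.List.sorted L (fun x => x) false with hS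
  have hlt : (pvDedup none S).Pairwise (· < ·) := pvDedup_none_lt S hsortedL
  have hperm : (pvDedup none S).Perm (PySem.Set.ofList L) := by
    rw [List.perm_ext_iff_of_nodup (List.Pairwise.imp (fun h => ne_of_lt h) hlt)
        (PySem.Set.nodup_ofList L)]
    intro a
    rw [pvDedup_none_mem S hsortedL, PySem.Set.mem_ofList, hS, PySem.List.mem_sorted]
  exact PySem.List.sorted_eq_of_perm_of_pairwise_lt (PySem.Set.ofList L) _ (fun x => x) hperm hlt
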